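-- pv_equiv track=rewrite | github.com/Rick0317/entanglement_boson | tt_decomposition/state_tensor.py | get_spin
-- ===== SOURCE A (Python) =====
-- def get_spin(base_4_digits):
--     digit_list = base_4_digits.split(",")
--     sum_spin = 0
--     for digit in digit_list:
--         if digit == "1":
--             sum_spin += 1
--         elif digit == "2":
--             sum_spin -= 1
--
--     return sum_spin
-- ===== SOURCE B (Python) =====
-- def get_spin(base_4_digits):
--     # Single character-level DFA pass over the raw string: no split, no token list.
--     # state: 0 = at start of a token, 1 = token so far is exactly "1",
--     #        2 = token so far is exactly "2", 3 = token can no longer be "1" or "2".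
--     total = 0
--     state = 0
--     for c in base_4_digits:
--         if c == ",":
--             if state == 1:
--                 total += 1
--             elif state == 2:
--                 total -= 1
--             state = 0
--         elif state == 0:
--             state = 1 if c == "1" else 2 if c == "2" else 3
--         else:
--             state = 3
--     if state == 1:
--         total += 1
--     elif state == 2:
--         total -= 1
--     return total
-- ===== Notes on version B (the rewrite author's own statement) =====
-- stated objective: alternative
-- what changed: Replaces split-then-scan (A builds the comma-split token list and folds an accumulator over it) with a single character-level four-state DFA over the raw string that never materialises any token: the automaton tracks whether the current token is still one of the two spin digits and settles each token at its closing comma or at end of string.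
import Mathlib
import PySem

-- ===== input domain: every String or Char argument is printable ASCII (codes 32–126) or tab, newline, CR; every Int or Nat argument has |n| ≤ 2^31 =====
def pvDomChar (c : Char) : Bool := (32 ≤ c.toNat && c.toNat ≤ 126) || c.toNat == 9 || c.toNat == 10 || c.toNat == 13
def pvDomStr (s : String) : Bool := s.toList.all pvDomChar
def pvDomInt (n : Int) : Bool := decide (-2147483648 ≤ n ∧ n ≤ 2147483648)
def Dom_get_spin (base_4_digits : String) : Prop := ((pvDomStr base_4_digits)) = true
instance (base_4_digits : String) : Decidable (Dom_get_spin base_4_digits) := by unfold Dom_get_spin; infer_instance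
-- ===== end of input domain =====

-- B replaces A's split-then-fold over the token list by a single character-level
-- 4-state DFA over the raw string (alternative decomposition; same O(n) cost).

-- ===== PORT A =====
-- A: build the comma-split token list, then one accumulating loop, +1 for "1", -1 for "2".
def get_spin (base_4_digits : String) : Int :=
  let digit_list := (PySem.Str.split? base_4_digits ",").getD []
  digit_list.foldl (fun sum_spin digit =>
    if digit = "1" then sum_spin + 1
    else if digit = "2" then sum_spin - 1
    else sum_spin) 0

-- ===== PORT B =====
-- B's DFA transition: state 0 = at start of a token, 1 = token so far is exactly "1",
-- 2 = token so far is exactly "2", 3 = token can no longer be "1" or "2".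
def get_spin_alt_step (p : Int × Nat) (c : Char) : Int × Nat :=
  if c = ',' then
    (if p.2 = 1 then p.1 + 1 else if p.2 = 2 then p.1 - 1 else p.1, 0)
  else if p.2 = 0 then
    (p.1, if c = '1' then 1 else if c = '2' then 2 else 3)
  else (p.1, 3)

-- B: one character-level pass, no token list ever built.
def get_spin_alt (base_4_digits : String) : Int :=
  let r := base_4_digits.toList.foldl get_spin_alt_step (0, 0)
  if r.2 = 1 then r.1 + 1 else if r.2 = 2 then r.1 - 1 else r.1

-- ===== PRECONDITION & SPEC =====
def Spec_get_spin (base_4_digits : String) (out : Int) : Prop := out = get_spin_alt base_4_digits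
instance (base_4_digits : String) (out : Int) : Decidable (Spec_get_spin base_4_digits out) := by unfold Spec_get_spin; infer_instance

-- ===== CLAIM (what is proved, stated in full; the proofs are below) =====
def Claim_equal_get_spin : Prop := ∀ (base_4_digits : String), Dom_get_spin base_4_digits → Spec_get_spin base_4_digits (get_spin base_4_digits)

-- ===== LEMMAS AND PROOFS =====

-- Simple reference splitter on chars (sep = ','), used only by the proofs.
def pvSp (cur : List Char) : List Char → List (List Char)
  | [] => [cur.reverse]
  | c :: r => if c = ',' then cur.reverse :: pvSp [] r else pvSp (c :: cur) r

-- Value a finished token contributes.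
def pvTok (t : List Char) : Int := if t = ['1'] then 1 else if t = ['2'] then -1 else 0

-- DFA state of a partially read (reversed) token.
def pvState (cur : List Char) : Nat :=
  if cur = [] then 0 else if cur = ['1'] then 1 else if cur = ['2'] then 2 else 3

theorem pvGo_nil (fuel : Nat) (cur : List Char) (acc : List (List Char)) :
    PySem.Chars.splitOn.go [','] (fuel+1) [] cur acc = (cur.reverse :: acc).reverse := by
  rw [PySem.Chars.splitOn.go]
  omega

theorem pvGo_comma (fuel : Nat) (r cur : List Char) (acc : List (List Char)) :
    PySem.Chars.splitOn.go [','] (fuel+1) (','::r) cur acc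
      = PySem.Chars.splitOn.go [','] fuel r [] (cur.reverse :: acc) := by
  rw [PySem.Chars.splitOn.go]
  rw [if_pos (by simp [List.isPrefixOf])]
  simp

theorem pvGo_other (fuel : Nat) (c : Char) (r cur : List Char) (acc : List (List Char))
    (hc : c ≠ ',') :
    PySem.Chars.splitOn.go [','] (fuel+1) (c::r) cur acc
      = PySem.Chars.splitOn.go [','] fuel r (c::cur) acc := by
  rw [PySem.Chars.splitOn.go]
  rw [if_neg (by simp only [List.isPrefixOf, Bool.and_true, beq_eq_false_iff_ne, ne_eq,
        Bool.not_eq_true]; exact (by simpa [eq_comm] using hc))]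

theorem pvGo_spec (l : List Char) : ∀ (fuel : Nat) (cur : List Char) (acc : List (List Char)),
    l.length < fuel →
    PySem.Chars.splitOn.go [','] fuel l cur acc = acc.reverse ++ pvSp cur l := by
  induction l with
  | nil =>
    intro fuel cur acc h
    match fuel, h with
    | fuel + 1, _ => simp [pvGo_nil, pvSp]
  | cons c r ih =>
    intro fuel cur acc h
    match fuel, h with
    | fuel + 1, h =>
      by_cases hc : c = ','
      · subst hc
        rw [pvGo_comma, ih fuel [] (cur.reverse :: acc) (by simpa using h)]
        simp [pvSp]
      · rw [pvGo_other fuel c r cur acc hc, ih fuel (c :: cur) acc (by simpa using h)]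
        simp [pvSp, hc]

theorem pvSplitOn_eq (l : List Char) : PySem.Chars.splitOn l [','] = pvSp [] l := by
  have := pvGo_spec l (l.length + 1) [] [] (by omega)
  simpa [PySem.Chars.splitOn] using this

theorem pvFoldA (ts : List (List Char)) : ∀ (acc : Int),
    (ts.map String.ofList).foldl (fun sum_spin digit =>
      if digit = "1" then sum_spin + 1
      else if digit = "2" then sum_spin - 1
      else sum_spin) acc = acc + (ts.map pvTok).sum := by
  induction ts with
  | nil => simp
  | cons t r ih =>
    intro acc
    have h1 : (String.ofList t = "1") ↔ t = ['1'] := by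
      constructor
      · intro h; have := congrArg String.toList h; simpa using this
      · intro h; subst h; rfl
    have h2 : (String.ofList t = "2") ↔ t = ['2'] := by
      constructor
      · intro h; have := congrArg String.toList h; simpa using this
      · intro h; subst h; rfl
    simp only [List.map_cons, List.foldl_cons, List.sum_cons, ih]
    by_cases e1 : t = ['1'] <;> by_cases e2 : t = ['2'] <;>
      simp [pvTok, h1, h2, e1, e2] <;> omega

theorem pvTok_reverse_state (cur : List Char) :
    pvTok cur.reverse = (if pvState cur = 1 then 1 else if pvState cur = 2 then -1 else 0) := by
  have r1 : (cur.reverse = ['1']) ↔ cur = ['1'] := by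
    rw [← List.reverse_inj]; simp
  have r2 : (cur.reverse = ['2']) ↔ cur = ['2'] := by
    rw [← List.reverse_inj]; simp
  by_cases e0 : cur = [] <;> by_cases e1 : cur = ['1'] <;> by_cases e2 : cur = ['2'] <;>
    simp_all [pvTok, pvState]

theorem pvFoldB (l : List Char) : ∀ (total : Int) (cur : List Char),
    (let r := l.foldl get_spin_alt_step (total, pvState cur)
     if r.2 = 1 then r.1 + 1 else if r.2 = 2 then r.1 - 1 else r.1)
    = total + ((pvSp cur l).map pvTok).sum := by
  induction l with
  | nil =>
    intro total cur
    simp only [List.foldl_nil, pvSp, List.map_cons, List.map_nil, List.sum_cons,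
      List.sum_nil, add_zero]
    rw [pvTok_reverse_state]
    split_ifs <;> omega
  | cons c r ih =>
    intro total cur
    by_cases hc : c = ','
    · subst hc
      have step : get_spin_alt_step (total, pvState cur) ',' =
          (total + pvTok cur.reverse, pvState []) := by
        rw [pvTok_reverse_state]
        unfold get_spin_alt_step
        rw [if_pos rfl]
        have h0 : pvState ([] : List Char) = 0 := rfl
        rw [h0, Prod.mk.injEq]
        refine ⟨?_, rfl⟩
        split_ifs <;> omega
      simp only [List.foldl_cons, step, ih]
      simp [pvSp]
      ring
    · have step : get_spin_alt_step (total, pvState cur) c = (total, pvState (c :: cur)) := by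
        by_cases e0 : cur = [] <;> by_cases e1 : cur = ['1'] <;> by_cases e2 : cur = ['2'] <;>
          simp_all [get_spin_alt_step, pvState]
      simp only [List.foldl_cons, step, ih]
      simp [pvSp, hc]

-- ===== VERDICT (by name: the statement is the Claim_ definition above) =====
theorem get_spin_spec : Claim_equal_get_spin := by
  intro s _
  unfold Spec_get_spin get_spin get_spin_alt
  have hsplit : (PySem.Str.split? s ",").getD [] = (pvSp [] s.toList).map String.ofList := by
    simp [PySem.Str.split?, PySem.Chars.split?, pvSplitOn_eq]
  rw [hsplit, pvFoldA]
  have := pvFoldB s.toList 0 []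
  simpa [pvState] using this.symm
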